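-- pv_equiv track=rewrite | github.com/OpaBear0311/gradeum-website | scripts/email-targeting/agent.py | _apply_email_pattern
-- ===== SOURCE A (Python) =====
-- def _apply_email_pattern(name: str, pattern: str, domain: str) -> str:
--     """Generate an email address from a name and pattern."""
--     parts = name.strip().split()
--     if len(parts) < 2:
--         return ""
--
--     first = parts[0].lower()
--     last = parts[-1].lower()
--
--     # Clean non-alpha chars
--     first = "".join(c for c in first if c.isalpha())
--     last = "".join(c for c in last if c.isalpha())
--
--     if not first or not last:
--         return ""
--
--     local = (
--         pattern
--         .replace("{first}", first)
--         .replace("{last}", last)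
--         .replace("{first_initial}", first[0])
--         .replace("{last_initial}", last[0])
--     )
--
--     return f"{local}@{domain}"
-- ===== SOURCE B (Python) =====
-- def _apply_email_pattern(name: str, pattern: str, domain: str) -> str:
--     """Generate an email address by tokenizing the pattern in a single left-to-right scan."""
--     parts = name.strip().split()
--     if len(parts) < 2:
--         return ""
--
--     first = "".join(c for c in parts[0].lower() if c.isalpha())
--     last = "".join(c for c in parts[-1].lower() if c.isalpha())
--
--     if not first or not last:
--         return ""
--
--     values = {
--         "first": first,
--         "last": last,
--         "first_initial": first[0],
--         "last_initial": last[0],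
--     }
--
--     out = []
--     i = 0
--     n = len(pattern)
--     while i < n:
--         matched = False
--         if pattern[i] == "{":
--             for key, val in values.items():
--                 token = "{" + key + "}"
--                 if pattern.startswith(token, i):
--                     out.append(val)
--                     i += len(token)
--                     matched = True
--                     break
--         if not matched:
--             out.append(pattern[i])
--             i += 1
--
--     return "".join(out) + "@" + domain
-- ===== Notes on version B (the rewrite author's own statement) =====
-- stated objective: alternative
-- what changed: A performs four sequential whole-string .replace passes; B parses the pattern once, left to right, emitting literal characters and looking up each '{...}' placeholder it meets in a dict of the four values, so the pattern is traversed a single time.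
-- outside the precondition, e.g. on _apply_email_pattern('T X', '{las{first}}', 'd'): A returns 'x@d', B returns '{last}@d'
import Mathlib
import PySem

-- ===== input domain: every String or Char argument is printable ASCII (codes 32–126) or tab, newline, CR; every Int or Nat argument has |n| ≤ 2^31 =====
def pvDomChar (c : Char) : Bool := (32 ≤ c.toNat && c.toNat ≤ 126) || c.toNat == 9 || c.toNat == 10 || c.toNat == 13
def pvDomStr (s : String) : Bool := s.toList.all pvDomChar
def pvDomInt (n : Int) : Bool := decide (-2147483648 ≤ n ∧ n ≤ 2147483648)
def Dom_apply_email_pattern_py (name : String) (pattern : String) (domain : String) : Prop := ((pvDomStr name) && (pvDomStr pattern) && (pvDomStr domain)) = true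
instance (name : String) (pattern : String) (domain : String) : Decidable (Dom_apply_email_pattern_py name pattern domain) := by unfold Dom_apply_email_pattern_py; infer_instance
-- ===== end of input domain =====

-- B replaces A's four sequential whole-string .replace passes by a single left-to-right scan of the
-- pattern that looks each '{...}' placeholder up in a table of the four values (alternative, not faster).

-- ===== PORT A =====
def apply_email_pattern_py (name : String) (pattern : String) (domain : String) : String :=
  let parts := PySem.Chars.split₀ (PySem.Chars.strip name.toList)
  match parts with
  | p0 :: p1 :: rs =>
    -- parts[0].lower() / parts[-1].lower(), then keep only alphabetic chars ("".join(... if c.isalpha()))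
    let first := (PySem.Chars.lower p0).filter PySem.Chars.isalpha
    let last := (PySem.Chars.lower (List.getLast (p1 :: rs) (List.cons_ne_nil _ _))).filter PySem.Chars.isalpha
    match first, last with
    | f0 :: _, l0 :: _ =>
      let localPart :=
        PySem.Chars.replace
          (PySem.Chars.replace
            (PySem.Chars.replace
              (PySem.Chars.replace pattern.toList "{first}".toList first)
              "{last}".toList last)
            "{first_initial}".toList [f0])
          "{last_initial}".toList [l0]
      String.ofList (localPart ++ '@' :: domain.toList)
    | _, _ => ""  -- if not first or not last
  | _ => ""  -- if len(parts) < 2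

-- ===== PORT B =====
-- Source B's while loop over pattern: at index i, if pattern[i] == '{' try the four dict tokens with
-- startswith and emit the value (advancing by the token's length), else emit the character.
def pvScan (v1 v2 v3 v4 : List Char) : List Char → List Char
  | [] => []
  | c :: t =>
    if c = '{' then
      if ("{first}".toList).isPrefixOf (c :: t) then v1 ++ pvScan v1 v2 v3 v4 (List.drop 7 (c :: t))
      else if ("{last}".toList).isPrefixOf (c :: t) then v2 ++ pvScan v1 v2 v3 v4 (List.drop 6 (c :: t))
      else if ("{first_initial}".toList).isPrefixOf (c :: t) then v3 ++ pvScan v1 v2 v3 v4 (List.drop 15 (c :: t))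
      else if ("{last_initial}".toList).isPrefixOf (c :: t) then v4 ++ pvScan v1 v2 v3 v4 (List.drop 14 (c :: t))
      else c :: pvScan v1 v2 v3 v4 t
    else c :: pvScan v1 v2 v3 v4 t
  termination_by s => s.length
  decreasing_by all_goals (simp [List.length_drop]; try omega)

def apply_email_pattern_py_alt (name : String) (pattern : String) (domain : String) : String :=
  let parts := PySem.Chars.split₀ (PySem.Chars.strip name.toList)
  if parts.length < 2 then "" else
  let first := (PySem.Chars.lower parts.headI).filter PySem.Chars.isalpha   -- parts[0] (guarded nonempty)
  let last := (PySem.Chars.lower parts.getLastI).filter PySem.Chars.isalpha -- parts[-1] (guarded nonempty)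
  if first.isEmpty || last.isEmpty then "" else
  -- values = {first, last, first_initial, last_initial}; single scan of the pattern
  String.ofList (pvScan first last (first.take 1) (last.take 1) pattern.toList ++ '@' :: domain.toList)

-- ===== PRECONDITION & SPEC =====
-- pvNoNest is a one-pass bracket check: no '{' may occur while a previous '{' is still unclosed.
-- Pre_ excludes patterns with such a nested '{' (e.g. "{las{first}}"): there an earlier .replace of A can
-- CREATE a new placeholder that a later .replace substitutes, while B reads the pattern literally — a
-- malformed-pattern corner on which both behaviours are defensible and unspecified.
def pvNoNest : Bool → List Char → Bool
  | _, [] => true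
  | o, c :: t => if c = '{' then !o && pvNoNest true t else if c = '}' then pvNoNest false t else pvNoNest o t

def Pre_apply_email_pattern_py (name : String) (pattern : String) (domain : String) : Prop :=
  pvNoNest false pattern.toList = true
instance (name : String) (pattern : String) (domain : String) : Decidable (Pre_apply_email_pattern_py name pattern domain) := by unfold Pre_apply_email_pattern_py; infer_instance

def pvWitness_apply_email_pattern_py : String × String × String :=
  ("Ada Lovelace", "{first}.{last}@x", "example.com")

def Spec_apply_email_pattern_py (name : String) (pattern : String) (domain : String) (out : String) : Prop := out = apply_email_pattern_py_alt name pattern domain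
instance (name : String) (pattern : String) (domain : String) (out : String) : Decidable (Spec_apply_email_pattern_py name pattern domain out) := by unfold Spec_apply_email_pattern_py; infer_instance

-- ===== CLAIM (what is proved, stated in full; the proofs are below) =====
def Claim_equal_apply_email_pattern_py : Prop := ∀ (name : String) (pattern : String) (domain : String), Dom_apply_email_pattern_py name pattern domain → Pre_apply_email_pattern_py name pattern domain → Spec_apply_email_pattern_py name pattern domain (apply_email_pattern_py name pattern domain)

-- ===== LEMMAS AND PROOFS =====

lemma replace_go_acc (old new : List Char) :
    ∀ fuel l acc, PySem.Chars.replace.go old new fuel l acc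
      = acc.reverse ++ PySem.Chars.replace.go old new fuel l [] := by
  intro fuel
  induction fuel with
  | zero => intro l acc; simp [PySem.Chars.replace.go]
  | succ n ih =>
    intro l acc
    cases l with
    | nil => simp [PySem.Chars.replace.go]
    | cons c t =>
      simp only [PySem.Chars.replace.go]
      by_cases h : old.isPrefixOf (c :: t)
      · simp only [h, if_true]
        rw [ih _ (new.reverse ++ acc), ih _ (new.reverse ++ [])]
        simp
      · simp only [h]
        rw [ih _ (c :: acc), ih _ [c]]
        simp

lemma replace_go_nil (old new : List Char) (fuel : ℕ) (acc : List Char) :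
    PySem.Chars.replace.go old new fuel [] acc = acc.reverse := by
  cases fuel <;> simp [PySem.Chars.replace.go]

lemma replace_go_fuel (old new : List Char) (hold : old ≠ []) :
    ∀ f₁ f₂ l acc, l.length ≤ f₁ → l.length ≤ f₂ →
      PySem.Chars.replace.go old new f₁ l acc = PySem.Chars.replace.go old new f₂ l acc := by
  intro f₁
  induction f₁ with
  | zero =>
    intro f₂ l acc h1 _
    have : l = [] := List.length_eq_zero_iff.mp (Nat.le_zero.mp h1)
    subst this
    rw [replace_go_nil, replace_go_nil]
  | succ n ih =>
    intro f₂ l acc h1 h2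
    cases l with
    | nil => rw [replace_go_nil, replace_go_nil]
    | cons c t =>
      cases f₂ with
      | zero => exact absurd h2 (by simp)
      | succ m =>
        simp only [PySem.Chars.replace.go]
        by_cases h : old.isPrefixOf (c :: t)
        · simp only [h, if_true]
          have hone : 1 ≤ old.length := by
            cases old with | nil => exact absurd rfl hold | cons _ _ => simp
          have h1' : t.length + 1 ≤ n + 1 := by simpa using h1
          have h2' : t.length + 1 ≤ m + 1 := by simpa using h2
          have hd : (List.drop old.length (c :: t)).length = t.length + 1 - old.length := by
            simp
          refine ih _ _ _ ?_ ?_ <;> rw [hd] <;> omega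
        · simp only [h]
          have h1' : t.length + 1 ≤ n + 1 := by simpa using h1
          have h2' : t.length + 1 ≤ m + 1 := by simpa using h2
          exact ih _ _ _ (by omega) (by omega)

lemma replace_nil (old new : List Char) (hold : old ≠ []) :
    PySem.Chars.replace [] old new = [] := by
  have : old.isEmpty = false := by cases old with | nil => exact absurd rfl hold | cons _ _ => rfl
  simp [PySem.Chars.replace, this, replace_go_nil]

lemma replace_pos (s old new : List Char) (hold : old ≠ []) (h : old.isPrefixOf s = true) :
    PySem.Chars.replace s old new = new ++ PySem.Chars.replace (List.drop old.length s) old new := by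
  have hne : old.isEmpty = false := by cases old with | nil => exact absurd rfl hold | cons _ _ => rfl
  cases s with
  | nil =>
    exfalso
    cases old with
    | nil => exact hold rfl
    | cons a as => simp [List.isPrefixOf] at h
  | cons c t =>
    simp only [PySem.Chars.replace, hne, Bool.false_eq_true, if_false]
    simp only [List.length_cons, PySem.Chars.replace.go, h, if_true]
    rw [replace_go_acc]
    have h1 : 1 ≤ old.length := by
      cases old with | nil => exact absurd rfl hold | cons _ _ => simp
    rw [replace_go_fuel old new hold t.length (List.drop old.length (c :: t)).length
          (List.drop old.length (c :: t)) [] (by simp; omega) le_rfl]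
    simp

lemma replace_neg (c : Char) (t old new : List Char) (hold : old ≠ [])
    (h : old.isPrefixOf (c :: t) = false) :
    PySem.Chars.replace (c :: t) old new = c :: PySem.Chars.replace t old new := by
  have hne : old.isEmpty = false := by cases old with | nil => exact absurd rfl hold | cons _ _ => rfl
  simp only [PySem.Chars.replace, hne, Bool.false_eq_true, if_false]
  simp only [List.length_cons, PySem.Chars.replace.go, h, Bool.false_eq_true, if_false]
  rw [replace_go_acc]
  simp

lemma prefix_head_false (c : Char) (X t : List Char) (h : c ≠ '{') :
    (('{' :: X).isPrefixOf (c :: t)) = false := by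
  simp [List.isPrefixOf]
  intro hc
  exact absurd hc.symm h

lemma replace_append_nb (u : List Char) (hu : '{' ∉ u) (x tl new : List Char) :
    PySem.Chars.replace (u ++ x) ('{' :: tl) new = u ++ PySem.Chars.replace x ('{' :: tl) new := by
  induction u with
  | nil => simp
  | cons a u' ih =>
    have ha : a ≠ '{' := by intro h; exact hu (h ▸ List.mem_cons_self)
    have hu' : '{' ∉ u' := fun h => hu (List.mem_cons_of_mem _ h)
    rw [List.cons_append, replace_neg a (u' ++ x) _ _ (by simp)
          (prefix_head_false a tl (u' ++ x) ha), ih hu']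
    rfl

lemma replace_nb (s : List Char) (hs : '{' ∉ s) (tl new : List Char) :
    PySem.Chars.replace s ('{' :: tl) new = s := by
  have := replace_append_nb s hs [] tl new
  rw [List.append_nil] at this
  rw [this, replace_nil _ _ (by simp), List.append_nil]

lemma prefix_close_iff :
    ∀ (l u w : List Char), '}' ∉ l → '}' ∉ u →
      (((l ++ ['}']).isPrefixOf (u ++ '}' :: w)) = true ↔ l = u) := by
  intro l
  induction l with
  | nil =>
    intro u w _ hu
    cases u with
    | nil => simp [List.isPrefixOf]
    | cons a u' =>
      have : a ≠ '}' := by intro h; exact hu (h ▸ List.mem_cons_self)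
      simp [List.isPrefixOf]
      intro h; exact absurd h.symm this
  | cons b l' ih =>
    intro u w hl hu
    have hb : b ≠ '}' := by intro h; exact hl (h ▸ List.mem_cons_self)
    have hl' : '}' ∉ l' := fun h => hl (List.mem_cons_of_mem _ h)
    cases u with
    | nil =>
      simp [List.isPrefixOf]
      intro h; exact absurd h hb
    | cons a u' =>
      have hu' : '}' ∉ u' := fun h => hu (List.mem_cons_of_mem _ h)
      simp only [List.cons_append, List.isPrefixOf, Bool.and_eq_true, beq_iff_eq,
        List.cons.injEq]
      rw [ih u' w hl' hu']
      try tauto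

lemma tok_prefix_iff (intr u w : List Char) (h1 : '}' ∉ intr) (h2 : '}' ∉ u) :
    ((('{' :: (intr ++ ['}'])).isPrefixOf ('{' :: (u ++ '}' :: w))) = true ↔ intr = u) := by
  have hstep : (('{' :: (intr ++ ['}'])).isPrefixOf ('{' :: (u ++ '}' :: w)))
      = ((intr ++ ['}']).isPrefixOf (u ++ '}' :: w)) := by
    simp [List.isPrefixOf]
  rw [hstep]
  exact prefix_close_iff intr u w h1 h2

lemma tok_prefix_false (intr u w : List Char) (h1 : '}' ∉ intr) (h2 : '}' ∉ u)
    (hne : intr ≠ u) :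
    (('{' :: (intr ++ ['}'])).isPrefixOf ('{' :: (u ++ '}' :: w))) = false := by
  have := tok_prefix_iff intr u w h1 h2
  cases h : (('{' :: (intr ++ ['}'])).isPrefixOf ('{' :: (u ++ '}' :: w))) with
  | false => rfl
  | true => exact absurd (this.mp h) hne

lemma mem_of_isPrefixOf {l t : List Char} (h : l.isPrefixOf t = true) {a : Char} (ha : a ∈ l) :
    a ∈ t := by
  rw [List.isPrefixOf_iff_prefix] at h
  exact h.sublist.mem ha

lemma self_prefix_append (l x : List Char) : (l.isPrefixOf (l ++ x)) = true := by
  rw [List.isPrefixOf_iff_prefix]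
  exact List.prefix_append l x

lemma nn_tail (c : Char) (t : List Char) (h : c ≠ '{') :
    pvNoNest false (c :: t) = pvNoNest false t := by
  simp only [pvNoNest, if_neg h]
  split_ifs <;> rfl

lemma nn_true_decomp :
    ∀ t, pvNoNest true t = true →
      (∃ u w, t = u ++ '}' :: w ∧ '{' ∉ u ∧ '}' ∉ u ∧ pvNoNest false w = true) ∨
      ('{' ∉ t ∧ '}' ∉ t) := by
  intro t
  induction t with
  | nil => intro _; right; simp
  | cons c t' ih =>
    intro h
    by_cases hc : c = '{'
    · subst hc
      simp [pvNoNest] at h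
    · by_cases hc2 : c = '}'
      · subst hc2
        left
        refine ⟨[], t', rfl, by simp, by simp, ?_⟩
        simpa [pvNoNest] using h
      · have h' : pvNoNest true t' = true := by
          simpa [pvNoNest, hc, hc2] using h
        rcases ih h' with ⟨u, w, rfl, hu1, hu2, hw⟩ | ⟨h1, h2⟩
        · left
          refine ⟨c :: u, w, rfl, ?_, ?_, hw⟩
          · intro hm
            rcases List.mem_cons.mp hm with hm | hm
            · exact hc hm.symm
            · exact hu1 hm
          · intro hm
            rcases List.mem_cons.mp hm with hm | hm
            · exact hc2 hm.symm
            · exact hu2 hm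
        · right
          constructor
          · intro hm
            rcases List.mem_cons.mp hm with hm | hm
            · exact hc hm.symm
            · exact h1 hm
          · intro hm
            rcases List.mem_cons.mp hm with hm | hm
            · exact hc2 hm.symm
            · exact h2 hm

lemma scan_append_nb (v1 v2 v3 v4 : List Char) :
    ∀ u, '{' ∉ u → ∀ x, pvScan v1 v2 v3 v4 (u ++ x) = u ++ pvScan v1 v2 v3 v4 x := by
  intro u
  induction u with
  | nil => intro _ x; simp
  | cons a u' ih =>
    intro hu x
    have ha : a ≠ '{' := by intro h; exact hu (h ▸ List.mem_cons_self)
    have hu' : '{' ∉ u' := fun h => hu (List.mem_cons_of_mem _ h)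
    rw [List.cons_append, pvScan, if_neg ha, ih hu' x]
    rfl

lemma scan_nb (v1 v2 v3 v4 : List Char) (s : List Char) (hs : '{' ∉ s) :
    pvScan v1 v2 v3 v4 s = s := by
  have := scan_append_nb v1 v2 v3 v4 s hs []
  rw [List.append_nil] at this
  rw [this, pvScan, List.append_nil]

-- the heart of the proof: A's four sequential replaces, bundled as pvChain
def pvChain (v1 v2 v3 v4 s : List Char) : List Char :=
  PySem.Chars.replace
    (PySem.Chars.replace
      (PySem.Chars.replace
        (PySem.Chars.replace s "{first}".toList v1)
        "{last}".toList v2)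
      "{first_initial}".toList v3)
    "{last_initial}".toList v4

lemma eTok1 : "{first}".toList = '{' :: ("first".toList ++ ['}']) := rfl
lemma eTok2 : "{last}".toList = '{' :: ("last".toList ++ ['}']) := rfl
lemma eTok3 : "{first_initial}".toList = '{' :: ("first_initial".toList ++ ['}']) := rfl
lemma eTok4 : "{last_initial}".toList = '{' :: ("last_initial".toList ++ ['}']) := rfl

lemma tok_prefix_true (intr w : List Char) (h1 : '}' ∉ intr) :
    (('{' :: (intr ++ ['}'])).isPrefixOf ('{' :: (intr ++ '}' :: w))) = true :=
  (tok_prefix_iff intr intr w h1 h1).mpr rfl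

lemma tok_noclose (intr t : List Char) (ht : '}' ∉ t) :
    (('{' :: (intr ++ ['}'])).isPrefixOf ('{' :: t)) = false := by
  cases h : (('{' :: (intr ++ ['}'])).isPrefixOf ('{' :: t)) with
  | false => rfl
  | true =>
    exfalso
    have h' : ((intr ++ ['}']).isPrefixOf t) = true := by
      simpa [List.isPrefixOf] using h
    exact ht (mem_of_isPrefixOf h' (by simp))

lemma drop_tok (intr w : List Char) :
    List.drop (('{' :: (intr ++ ['}'])).length) ('{' :: (intr ++ '}' :: w)) = w := by
  rw [show '{' :: (intr ++ '}' :: w) = ('{' :: (intr ++ ['}'])) ++ w by simp]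
  exact List.drop_left

lemma pvChain_nil (v1 v2 v3 v4 : List Char) : pvChain v1 v2 v3 v4 [] = [] := by
  unfold pvChain
  rw [replace_nil _ _ (by simp), replace_nil _ _ (by simp), replace_nil _ _ (by simp),
      replace_nil _ _ (by simp)]

lemma pvChain_tok1 (v1 v2 v3 v4 : List Char) (h1 : '{' ∉ v1) (rest : List Char) :
    pvChain v1 v2 v3 v4 ("{first}".toList ++ rest) = v1 ++ pvChain v1 v2 v3 v4 rest := by
  unfold pvChain
  rw [replace_pos _ _ _ (by simp) (self_prefix_append _ _), List.drop_left,
      eTok2, replace_append_nb v1 h1, eTok3, replace_append_nb v1 h1,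
      eTok4, replace_append_nb v1 h1]

lemma pvChain_tok2 (v1 v2 v3 v4 : List Char) (h2 : '{' ∉ v2) (rest : List Char) :
    pvChain v1 v2 v3 v4 ("{last}".toList ++ rest) = v2 ++ pvChain v1 v2 v3 v4 rest := by
  unfold pvChain
  rw [show "{last}".toList ++ rest = '{' :: ("last".toList ++ '}' :: rest) from rfl,
      eTok1, eTok2, eTok3, eTok4]
  rw [replace_neg _ _ _ _ (by simp)
        (tok_prefix_false "first".toList "last".toList rest (by decide) (by decide) (by decide)),
      replace_append_nb "last".toList (by decide),
      replace_neg '}' rest _ _ (by simp) (prefix_head_false '}' _ _ (by decide))]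
  rw [replace_pos _ _ _ (by simp) (tok_prefix_true "last".toList _ (by decide)), drop_tok]
  rw [replace_append_nb v2 h2, replace_append_nb v2 h2]

lemma pvChain_tok3 (v1 v2 v3 v4 : List Char) (h3 : '{' ∉ v3) (rest : List Char) :
    pvChain v1 v2 v3 v4 ("{first_initial}".toList ++ rest)
      = v3 ++ pvChain v1 v2 v3 v4 rest := by
  unfold pvChain
  rw [show "{first_initial}".toList ++ rest = '{' :: ("first_initial".toList ++ '}' :: rest) from rfl,
      eTok1, eTok2, eTok3, eTok4]
  rw [replace_neg _ _ _ _ (by simp)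
        (tok_prefix_false "first".toList "first_initial".toList rest (by decide) (by decide) (by decide)),
      replace_append_nb "first_initial".toList (by decide),
      replace_neg '}' rest _ _ (by simp) (prefix_head_false '}' _ _ (by decide))]
  rw [replace_neg _ _ _ _ (by simp)
        (tok_prefix_false "last".toList "first_initial".toList _ (by decide) (by decide) (by decide)),
      replace_append_nb "first_initial".toList (by decide),
      replace_neg '}' _ _ _ (by simp) (prefix_head_false '}' _ _ (by decide))]
  rw [replace_pos _ _ _ (by simp) (tok_prefix_true "first_initial".toList _ (by decide)), drop_tok]
  rw [replace_append_nb v3 h3]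

lemma pvChain_tok4 (v1 v2 v3 v4 : List Char) (rest : List Char) :
    pvChain v1 v2 v3 v4 ("{last_initial}".toList ++ rest)
      = v4 ++ pvChain v1 v2 v3 v4 rest := by
  unfold pvChain
  rw [show "{last_initial}".toList ++ rest = '{' :: ("last_initial".toList ++ '}' :: rest) from rfl,
      eTok1, eTok2, eTok3, eTok4]
  rw [replace_neg _ _ _ _ (by simp)
        (tok_prefix_false "first".toList "last_initial".toList rest (by decide) (by decide) (by decide)),
      replace_append_nb "last_initial".toList (by decide),
      replace_neg '}' rest _ _ (by simp) (prefix_head_false '}' _ _ (by decide))]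
  rw [replace_neg _ _ _ _ (by simp)
        (tok_prefix_false "last".toList "last_initial".toList _ (by decide) (by decide) (by decide)),
      replace_append_nb "last_initial".toList (by decide),
      replace_neg '}' _ _ _ (by simp) (prefix_head_false '}' _ _ (by decide))]
  rw [replace_neg _ _ _ _ (by simp)
        (tok_prefix_false "first_initial".toList "last_initial".toList _ (by decide) (by decide) (by decide)),
      replace_append_nb "last_initial".toList (by decide),
      replace_neg '}' _ _ _ (by simp) (prefix_head_false '}' _ _ (by decide))]
  rw [replace_pos _ _ _ (by simp) (tok_prefix_true "last_initial".toList _ (by decide)), drop_tok]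

lemma pvChain_lit (v1 v2 v3 v4 : List Char) (c : Char) (t : List Char) (hc : c ≠ '{') :
    pvChain v1 v2 v3 v4 (c :: t) = c :: pvChain v1 v2 v3 v4 t := by
  unfold pvChain
  rw [eTok1, eTok2, eTok3, eTok4]
  rw [replace_neg c t _ _ (by simp) (prefix_head_false c _ _ hc),
      replace_neg c _ _ _ (by simp) (prefix_head_false c _ _ hc),
      replace_neg c _ _ _ (by simp) (prefix_head_false c _ _ hc),
      replace_neg c _ _ _ (by simp) (prefix_head_false c _ _ hc)]

lemma pvChain_brace (v1 v2 v3 v4 u w : List Char) (hu1 : '{' ∉ u) (hu2 : '}' ∉ u)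
    (hn1 : "first".toList ≠ u) (hn2 : "last".toList ≠ u)
    (hn3 : "first_initial".toList ≠ u) (hn4 : "last_initial".toList ≠ u) :
    pvChain v1 v2 v3 v4 ('{' :: (u ++ '}' :: w))
      = '{' :: (u ++ '}' :: pvChain v1 v2 v3 v4 w) := by
  unfold pvChain
  rw [eTok1, eTok2, eTok3, eTok4]
  rw [replace_neg _ _ _ _ (by simp) (tok_prefix_false "first".toList u w (by decide) hu2 hn1),
      replace_append_nb u hu1,
      replace_neg '}' w _ _ (by simp) (prefix_head_false '}' _ _ (by decide))]
  rw [replace_neg _ _ _ _ (by simp) (tok_prefix_false "last".toList u _ (by decide) hu2 hn2),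
      replace_append_nb u hu1,
      replace_neg '}' _ _ _ (by simp) (prefix_head_false '}' _ _ (by decide))]
  rw [replace_neg _ _ _ _ (by simp) (tok_prefix_false "first_initial".toList u _ (by decide) hu2 hn3),
      replace_append_nb u hu1,
      replace_neg '}' _ _ _ (by simp) (prefix_head_false '}' _ _ (by decide))]
  rw [replace_neg _ _ _ _ (by simp) (tok_prefix_false "last_initial".toList u _ (by decide) hu2 hn4),
      replace_append_nb u hu1,
      replace_neg '}' _ _ _ (by simp) (prefix_head_false '}' _ _ (by decide))]

lemma pvChain_bare (v1 v2 v3 v4 t : List Char) (ht1 : '{' ∉ t) (ht2 : '}' ∉ t) :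
    pvChain v1 v2 v3 v4 ('{' :: t) = '{' :: t := by
  unfold pvChain
  rw [eTok1, eTok2, eTok3, eTok4]
  rw [replace_neg _ _ _ _ (by simp) (tok_noclose "first".toList t ht2), replace_nb t ht1,
      replace_neg _ _ _ _ (by simp) (tok_noclose "last".toList t ht2), replace_nb t ht1,
      replace_neg _ _ _ _ (by simp) (tok_noclose "first_initial".toList t ht2), replace_nb t ht1,
      replace_neg _ _ _ _ (by simp) (tok_noclose "last_initial".toList t ht2), replace_nb t ht1]

lemma pvScan_nil (v1 v2 v3 v4 : List Char) : pvScan v1 v2 v3 v4 [] = [] := by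
  rw [pvScan]

lemma pvScan_tok1 (v1 v2 v3 v4 rest : List Char) :
    pvScan v1 v2 v3 v4 ("{first}".toList ++ rest) = v1 ++ pvScan v1 v2 v3 v4 rest := by
  rw [show "{first}".toList ++ rest = '{'::'f'::'i'::'r'::'s'::'t'::'}'::rest from rfl, pvScan]
  simp [List.isPrefixOf]

lemma pvScan_tok2 (v1 v2 v3 v4 rest : List Char) :
    pvScan v1 v2 v3 v4 ("{last}".toList ++ rest) = v2 ++ pvScan v1 v2 v3 v4 rest := by
  rw [show "{last}".toList ++ rest = '{'::'l'::'a'::'s'::'t'::'}'::rest from rfl, pvScan]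
  simp [List.isPrefixOf]

lemma pvScan_tok3 (v1 v2 v3 v4 rest : List Char) :
    pvScan v1 v2 v3 v4 ("{first_initial}".toList ++ rest) = v3 ++ pvScan v1 v2 v3 v4 rest := by
  rw [show "{first_initial}".toList ++ rest
        = '{'::'f'::'i'::'r'::'s'::'t'::'_'::'i'::'n'::'i'::'t'::'i'::'a'::'l'::'}'::rest from rfl,
      pvScan]
  simp [List.isPrefixOf]

lemma pvScan_tok4 (v1 v2 v3 v4 rest : List Char) :
    pvScan v1 v2 v3 v4 ("{last_initial}".toList ++ rest) = v4 ++ pvScan v1 v2 v3 v4 rest := by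
  rw [show "{last_initial}".toList ++ rest
        = '{'::'l'::'a'::'s'::'t'::'_'::'i'::'n'::'i'::'t'::'i'::'a'::'l'::'}'::rest from rfl,
      pvScan]
  simp [List.isPrefixOf]

lemma pvScan_lit (v1 v2 v3 v4 : List Char) (c : Char) (t : List Char) (hc : c ≠ '{') :
    pvScan v1 v2 v3 v4 (c :: t) = c :: pvScan v1 v2 v3 v4 t := by
  rw [pvScan]
  simp [hc]

lemma pvScan_brace (v1 v2 v3 v4 : List Char) (t : List Char)
    (hp1 : ("{first}".toList).isPrefixOf ('{' :: t) = false)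
    (hp2 : ("{last}".toList).isPrefixOf ('{' :: t) = false)
    (hp3 : ("{first_initial}".toList).isPrefixOf ('{' :: t) = false)
    (hp4 : ("{last_initial}".toList).isPrefixOf ('{' :: t) = false) :
    pvScan v1 v2 v3 v4 ('{' :: t) = '{' :: pvScan v1 v2 v3 v4 t := by
  rw [pvScan]
  simp at hp1 hp2 hp3 hp4
  simp [hp1, hp2, hp3, hp4]

lemma nn_open (t : List Char) : pvNoNest false ('{' :: t) = pvNoNest true t := by
  simp [pvNoNest]

lemma nn_tok1 (rest : List Char) :
    pvNoNest false ("{first}".toList ++ rest) = pvNoNest false rest := by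
  rw [show "{first}".toList ++ rest = '{'::'f'::'i'::'r'::'s'::'t'::'}'::rest from rfl]
  simp [pvNoNest]

lemma nn_tok2 (rest : List Char) :
    pvNoNest false ("{last}".toList ++ rest) = pvNoNest false rest := by
  rw [show "{last}".toList ++ rest = '{'::'l'::'a'::'s'::'t'::'}'::rest from rfl]
  simp [pvNoNest]

lemma nn_tok3 (rest : List Char) :
    pvNoNest false ("{first_initial}".toList ++ rest) = pvNoNest false rest := by
  rw [show "{first_initial}".toList ++ rest
        = '{'::'f'::'i'::'r'::'s'::'t'::'_'::'i'::'n'::'i'::'t'::'i'::'a'::'l'::'}'::rest from rfl]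
  simp [pvNoNest]

lemma nn_tok4 (rest : List Char) :
    pvNoNest false ("{last_initial}".toList ++ rest) = pvNoNest false rest := by
  rw [show "{last_initial}".toList ++ rest
        = '{'::'l'::'a'::'s'::'t'::'_'::'i'::'n'::'i'::'t'::'i'::'a'::'l'::'}'::rest from rfl]
  simp [pvNoNest]

-- the heart: under pvNoNest, A's four sequential replaces equal B's single scan
lemma chain_eq_scan (v1 v2 v3 v4 : List Char)
    (h1 : '{' ∉ v1) (h2 : '{' ∉ v2) (h3 : '{' ∉ v3) :
    ∀ n s, s.length ≤ n → pvNoNest false s = true →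
      pvChain v1 v2 v3 v4 s = pvScan v1 v2 v3 v4 s := by
  intro n
  induction n with
  | zero =>
    intro s hs _
    have : s = [] := List.length_eq_zero_iff.mp (Nat.le_zero.mp hs)
    subst this
    rw [pvChain_nil, pvScan_nil]
  | succ n ih =>
    intro s hs hnn
    cases s with
    | nil => rw [pvChain_nil, pvScan_nil]
    | cons c t =>
      by_cases hc : c = '{'
      · subst hc
        by_cases hp1 : ("{first}".toList).isPrefixOf ('{' :: t) = true
        · obtain ⟨rest, hrest⟩ := List.isPrefixOf_iff_prefix.mp hp1
          rw [← hrest] at hs hnn ⊢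
          rw [nn_tok1] at hnn
          rw [pvChain_tok1 _ _ _ _ h1, pvScan_tok1]
          rw [ih rest (by simp at hs ⊢; omega) hnn]
        · by_cases hp2 : ("{last}".toList).isPrefixOf ('{' :: t) = true
          · obtain ⟨rest, hrest⟩ := List.isPrefixOf_iff_prefix.mp hp2
            rw [← hrest] at hs hnn ⊢
            rw [nn_tok2] at hnn
            rw [pvChain_tok2 _ _ _ _ h2, pvScan_tok2]
            rw [ih rest (by simp at hs ⊢; omega) hnn]
          · by_cases hp3 : ("{first_initial}".toList).isPrefixOf ('{' :: t) = true
            · obtain ⟨rest, hrest⟩ := List.isPrefixOf_iff_prefix.mp hp3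
              rw [← hrest] at hs hnn ⊢
              rw [nn_tok3] at hnn
              rw [pvChain_tok3 _ _ _ _ h3, pvScan_tok3]
              rw [ih rest (by simp at hs ⊢; omega) hnn]
            · by_cases hp4 : ("{last_initial}".toList).isPrefixOf ('{' :: t) = true
              · obtain ⟨rest, hrest⟩ := List.isPrefixOf_iff_prefix.mp hp4
                rw [← hrest] at hs hnn ⊢
                rw [nn_tok4] at hnn
                rw [pvChain_tok4, pvScan_tok4]
                rw [ih rest (by simp at hs ⊢; omega) hnn]
              · rw [Bool.not_eq_true] at hp1 hp2 hp3 hp4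
                have hnnt : pvNoNest true t = true := by rwa [nn_open] at hnn
                rcases nn_true_decomp t hnnt with ⟨u, w, rfl, hu1, hu2, hw⟩ | ⟨ht1, ht2⟩
                · have hp1' := hp1; have hp2' := hp2; have hp3' := hp3; have hp4' := hp4
                  rw [eTok1] at hp1'; rw [eTok2] at hp2'
                  rw [eTok3] at hp3'; rw [eTok4] at hp4'
                  have hn1 : "first".toList ≠ u := by
                    intro he
                    have := (tok_prefix_iff "first".toList u w (by decide) hu2).mpr he
                    rw [hp1'] at this
                    exact Bool.false_ne_true this
                  have hn2 : "last".toList ≠ u := by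
                    intro he
                    have := (tok_prefix_iff "last".toList u w (by decide) hu2).mpr he
                    rw [hp2'] at this
                    exact Bool.false_ne_true this
                  have hn3 : "first_initial".toList ≠ u := by
                    intro he
                    have := (tok_prefix_iff "first_initial".toList u w (by decide) hu2).mpr he
                    rw [hp3'] at this
                    exact Bool.false_ne_true this
                  have hn4 : "last_initial".toList ≠ u := by
                    intro he
                    have := (tok_prefix_iff "last_initial".toList u w (by decide) hu2).mpr he
                    rw [hp4'] at this
                    exact Bool.false_ne_true this
                  rw [pvChain_brace _ _ _ _ u w hu1 hu2 hn1 hn2 hn3 hn4,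
                      pvScan_brace _ _ _ _ _ hp1 hp2 hp3 hp4,
                      scan_append_nb _ _ _ _ u hu1,
                      pvScan_lit _ _ _ _ '}' w (by decide)]
                  rw [ih w (by simp at hs ⊢; omega) hw]
                · rw [pvChain_bare _ _ _ _ t ht1 ht2,
                      pvScan_brace _ _ _ _ _ hp1 hp2 hp3 hp4, scan_nb _ _ _ _ t ht1]
      · rw [pvChain_lit _ _ _ _ c t hc, pvScan_lit _ _ _ _ c t hc]
        rw [nn_tail c t hc] at hnn
        rw [ih t (by simp at hs ⊢; omega) hnn]

lemma brace_not_mem_filter (l : List Char) : '{' ∉ List.filter PySem.Chars.isalpha l := by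
  intro h
  exact absurd (List.mem_filter.mp h).2 (by decide)

-- ===== VERDICT (by name: the statement is the Claim_ definition above) =====
theorem apply_email_pattern_py_spec : Claim_equal_apply_email_pattern_py := by
  intro name pattern domain _ hpre
  unfold Pre_apply_email_pattern_py at hpre
  unfold Spec_apply_email_pattern_py apply_email_pattern_py apply_email_pattern_py_alt
  rcases hparts : PySem.Chars.split₀ (PySem.Chars.strip name.toList) with _ | ⟨p0, _ | ⟨p1, rs⟩⟩
  · rfl
  · rfl
  · dsimp only
    have hlen : ¬ (p0 :: p1 :: rs).length < 2 := by simp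
    rw [if_neg hlen]
    have hlast : (p0 :: p1 :: rs).getLastI = List.getLast (p1 :: rs) (List.cons_ne_nil _ _) := by
      rw [List.getLastI_eq_getLast?_getD, List.getLast?_cons_cons,
          List.getLast?_eq_some_getLast (List.cons_ne_nil _ _)]
      rfl
    rw [List.headI, hlast]
    rcases hf : (PySem.Chars.lower p0).filter PySem.Chars.isalpha with _ | ⟨f0, fs⟩
    · rcases hl : (PySem.Chars.lower (List.getLast (p1 :: rs) (List.cons_ne_nil _ _))).filter
          PySem.Chars.isalpha with _ | ⟨l0, ls⟩ <;> simp
    · rcases hl : (PySem.Chars.lower (List.getLast (p1 :: rs) (List.cons_ne_nil _ _))).filter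
          PySem.Chars.isalpha with _ | ⟨l0, ls⟩
      · simp
      · rw [if_neg (by simp)]
        have hv1 : '{' ∉ f0 :: fs := hf ▸ brace_not_mem_filter _
        have hv2 : '{' ∉ l0 :: ls := hl ▸ brace_not_mem_filter _
        have hv3 : '{' ∉ [f0] := by
          intro h
          simp at h
          exact hv1 (by rw [h]; exact List.mem_cons_self)
        have hmain := chain_eq_scan (f0 :: fs) (l0 :: ls) [f0] [l0] hv1 hv2 hv3
          pattern.toList.length pattern.toList le_rfl hpre
        unfold pvChain at hmain
        dsimp only
        rw [hmain]
        simp [List.take]
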